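-- pv_equiv track=rewrite | github.com/jongjunkim/Algorithm_Study | Progremmers level2/방금 그곡.py | solution
-- ===== SOURCE A (Python) =====
-- def solution(m, musicinfos):
--
--     res = "(None)"
--     interval = 0
--     m = m.replace("C#","H").replace("D#", "I").replace("F#", "J").replace("G#","K").replace("A#", "L")
--
--     for info in musicinfos:
--         start, end, name, note = info.split(",")
--         shr, smin = start.split(":")
--         ehr, emin = end.split(":")
--         start_minutes = int(shr)* 60 + int(smin)
--         end_minutes = int(ehr)* 60 + int(emin)
--         time = end_minutes - start_minutes
--         note = note.replace("C#","H").replace("D#", "I").replace("F#", "J").replace("G#","K").replace("A#", "L")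
--
--         note = note * (time // len(note)) + note[0:time % len(note)]
--
--         if m in note and interval < time:
--             res = name
--             interval = end_minutes - start_minutes
--
--     return res
-- ===== SOURCE B (Python) =====
-- def _tr(s):
--     return s.replace("C#", "H").replace("D#", "I").replace("F#", "J").replace("G#", "K").replace("A#", "L")
--
--
-- def _minutes(t):
--     hr, mn = t.split(":")
--     return int(hr) * 60 + int(mn)
--
--
-- def _matches(melody, note, time):
--     # Does the melody occur in the first `time` characters of the note pattern
--     # repeated cyclically?  Tested by modular indexing, without ever building
--     # the expanded play string: a match starting at i only depends on i % len(note),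
--     # so only starts i < min(len(note), time - len(melody) + 1) need checking.
--     k, L = len(melody), len(note)
--     if time < k:
--         return False
--     return any(all(melody[j] == note[(i + j) % L] for j in range(k))
--                for i in range(min(L, time - k + 1)))
--
--
-- def solution(m, musicinfos):
--     melody = _tr(m)
--     res, interval = "(None)", 0
--     for info in musicinfos:
--         start, end, name, note = info.split(",")
--         time = _minutes(end) - _minutes(start)
--         if interval < time and _matches(melody, _tr(note), time):
--             res, interval = name, time
--     return res
-- ===== Notes on version B (the rewrite author's own statement) =====
-- stated objective: alternative
-- what changed: A expands each note pattern to a play string of the full duration and runs a substring search on it; B never materializes that string: it tests the melody against the note pattern cyclically by modular indexing, checking only the start offsets i < min(len(note), time-len(melody)+1) since a match at i depends only on i mod len(note), and it short-circuits the whole test when the duration cannot beat the current best.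
import Mathlib
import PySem

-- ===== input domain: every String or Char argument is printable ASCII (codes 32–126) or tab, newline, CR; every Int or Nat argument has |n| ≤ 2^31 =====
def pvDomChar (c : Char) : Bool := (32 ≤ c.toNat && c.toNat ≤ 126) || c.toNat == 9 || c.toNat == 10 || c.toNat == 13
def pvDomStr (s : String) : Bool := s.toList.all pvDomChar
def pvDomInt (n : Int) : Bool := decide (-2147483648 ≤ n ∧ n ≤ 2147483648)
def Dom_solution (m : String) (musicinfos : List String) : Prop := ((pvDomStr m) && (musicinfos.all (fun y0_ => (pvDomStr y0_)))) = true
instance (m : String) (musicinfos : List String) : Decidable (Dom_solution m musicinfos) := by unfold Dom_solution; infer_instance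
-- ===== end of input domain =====

-- B replaces A's expand-then-substring-search per song by a cyclic modular-index match
-- (no expanded play string is built), short-circuited when the duration cannot beat the best.

-- shared sharps-to-letter translation (the same replace chain appears verbatim in both sources)
def pvTr (s : String) : String :=
  PySem.Str.replace (PySem.Str.replace (PySem.Str.replace (PySem.Str.replace (PySem.Str.replace s "C#" "H") "D#" "I") "F#" "J") "G#" "K") "A#" "L"

-- ===== PORT A =====
-- one iteration of A's loop over the (res, interval) state; parse failures / empty note are
-- where the Python raises — excluded by Pre_solution, the port keeps the state there
def solStep (melody : String) (s : String × Int) (info : String) : String × Int :=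
  match PySem.Str.split? info "," with
  | some [start, e, name, note] =>
    match PySem.Str.split? start ":", PySem.Str.split? e ":" with
    | some [shr, smin], some [ehr, emin] =>
      match PySem.Int.ofStr? shr, PySem.Int.ofStr? smin, PySem.Int.ofStr? ehr, PySem.Int.ofStr? emin with
      | some a, some b, some c, some d =>
        let startMin := a * 60 + b
        let endMin := c * 60 + d
        let time := endMin - startMin
        let cs := (pvTr note).toList
        if cs.length = 0 then s
        else
          let played := PySem.List.pyRepeat cs (PySem.Int.floordiv time (cs.length : Int)) ++
            PySem.List.slice cs (some 0) (some (PySem.Int.mod time (cs.length : Int)))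
          if PySem.Chars.isIn melody.toList played && decide (s.2 < time) then (name, time) else s
      | _, _, _, _ => s
    | _, _ => s
  | _ => s

def solution (m : String) (musicinfos : List String) : String :=
  (musicinfos.foldl (solStep (pvTr m)) ("(None)", 0)).1

-- ===== PORT B =====
def pvMinutes (t : String) : Option Int :=
  match PySem.Str.split? t ":" with
  | some [hr, mn] =>
    match PySem.Int.ofStr? hr, PySem.Int.ofStr? mn with
    | some h, some mi => some (h * 60 + mi)
    | _, _ => none
  | _ => none

-- Source B's _matches: does the melody occur in the first `time` characters of the note
-- pattern repeated cyclically, tested by modular indexing (no expanded string)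
def pvMatches (melody note : List Char) (time : Int) : Bool :=
  let k : Int := melody.length
  let L : Int := note.length
  if time < k then false
  else (PySem.List.pyRange 0 (min L (time - k + 1)) 1).any (fun i =>
    (PySem.List.pyRange 0 k 1).all (fun j =>
      PySem.List.pyGet? melody j == PySem.List.pyGet? note (PySem.Int.mod (i + j) L)))

def altStep (melody : List Char) (s : String × Int) (info : String) : String × Int :=
  match PySem.Str.split? info "," with
  | some [start, e, name, note] =>
    match pvMinutes e, pvMinutes start with
    | some em, some sm =>
      let time := em - sm
      if decide (s.2 < time) && pvMatches melody (pvTr note).toList time then (name, time) else s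
    | _, _ => s
  | _ => s

def solution_alt (m : String) (musicinfos : List String) : String :=
  (musicinfos.foldl (altStep (pvTr m).toList) ("(None)", 0)).1

-- ===== PRECONDITION & SPEC =====
-- Pre_ excludes exactly the infos on which the Python A raises: not exactly 4 comma fields,
-- a time not of the form int:int, or an empty note pattern (ZeroDivisionError).
def pvInfoOK (info : String) : Bool :=
  match PySem.Str.split? info "," with
  | some [start, e, _, note] =>
    match PySem.Str.split? start ":", PySem.Str.split? e ":" with
    | some [shr, smin], some [ehr, emin] =>
      (PySem.Int.ofStr? shr).isSome && (PySem.Int.ofStr? smin).isSome &&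
      (PySem.Int.ofStr? ehr).isSome && (PySem.Int.ofStr? emin).isSome &&
      !((pvTr note).toList.isEmpty)
    | _, _ => false
  | _ => false

def Pre_solution (m : String) (musicinfos : List String) : Prop := musicinfos.all pvInfoOK = true
instance (m : String) (musicinfos : List String) : Decidable (Pre_solution m musicinfos) := by
  unfold Pre_solution; infer_instance

def pvWitness_solution : String × List String := ("ABC", ["12:00,12:14,HELLO,C#ABCDEF"])

def Spec_solution (m : String) (musicinfos : List String) (out : String) : Prop := out = solution_alt m musicinfos
instance (m : String) (musicinfos : List String) (out : String) : Decidable (Spec_solution m musicinfos out) := by unfold Spec_solution; infer_instance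

-- ===== CLAIM (what is proved, stated in full; the proofs are below) =====
def Claim_equal_solution : Prop := ∀ (m : String) (musicinfos : List String), Dom_solution m musicinfos → Pre_solution m musicinfos → Spec_solution m musicinfos (solution m musicinfos)

-- ===== LEMMAS AND PROOFS =====

theorem getD_flatten_replicate (cs : List Char) (q p : Nat) (c : Char)
    (hp : p < q * cs.length) :
    ((List.replicate q cs).flatten).getD p c = cs.getD (p % cs.length) c := by
  induction q generalizing p with
  | zero => omega
  | succ q ih =>
    rw [List.replicate_succ, List.flatten_cons]
    by_cases h : p < cs.length
    · rw [List.getD_append _ _ _ _ h, Nat.mod_eq_of_lt h]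
    · push_neg at h
      rw [Nat.succ_mul] at hp
      rw [List.getD_append_right _ _ _ _ h, ih _ (by omega)]
      congr 1
      conv_rhs => rw [show p = (p - cs.length) + cs.length by omega]
      rw [Nat.add_mod_right]

theorem played_length (cs : List Char) (q r : Nat) (hr : r ≤ cs.length) :
    ((List.replicate q cs).flatten ++ cs.take r).length = q * cs.length + r := by
  simp [List.length_flatten, Function.comp_def, List.length_take, Nat.min_eq_left hr,
    Nat.mul_comm]

theorem played_getD (cs : List Char) (q r p : Nat) (c : Char) (hr : r ≤ cs.length)
    (hp : p < q * cs.length + r) :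
    ((List.replicate q cs).flatten ++ cs.take r).getD p c = cs.getD (p % cs.length) c := by
  have hlen : ((List.replicate q cs).flatten).length = q * cs.length := by
    simp [List.length_flatten, Function.comp_def, Nat.mul_comm]
  by_cases h : p < q * cs.length
  · rw [List.getD_append _ _ _ _ (by rw [hlen]; exact h), getD_flatten_replicate _ _ _ _ h]
  · push_neg at h
    rw [List.getD_append_right _ _ _ _ (by rw [hlen]; exact h), hlen]
    have h1 : p - q * cs.length < r := by omega
    rw [List.getD_eq_getElem?_getD, List.getElem?_take_of_lt h1, ← List.getD_eq_getElem?_getD]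
    congr 1
    conv_rhs => rw [show p = (p - q * cs.length) + cs.length * q by
      rw [Nat.mul_comm cs.length q]; omega]
    rw [Nat.add_mul_mod_self_left, Nat.mod_eq_of_lt (by omega)]

theorem infix_iff_getD (l1 l2 : List Char) (c : Char) :
    l1 <:+: l2 ↔ ∃ i, i + l1.length ≤ l2.length ∧
      ∀ j < l1.length, l1.getD j c = l2.getD (i + j) c := by
  constructor
  · rintro ⟨s, t, h⟩
    refine ⟨s.length, by simp [← h], ?_⟩
    intro j hj
    rw [← h, List.append_assoc, List.getD_append_right _ _ _ _ (by omega),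
      Nat.add_sub_cancel_left, List.getD_append _ _ _ _ hj]
  · rintro ⟨i, hle, hj⟩
    have hl : l1 = (l2.drop i).take l1.length := by
      apply List.ext_getElem
      · simp; omega
      · intro n h1 h2
        have := hj n h1
        rw [List.getD_eq_getElem _ _ h1, List.getD_eq_getElem _ _ (by omega)] at this
        simpa using this
    rw [hl]
    exact List.infix_iff_prefix_suffix.mpr ⟨l2.drop i, List.take_prefix _ _, List.drop_suffix _ _⟩

theorem inner_all_iff (ms cs : List Char) (hcs : cs.length ≠ 0) (i : Nat) :
    ((PySem.List.pyRange 0 (ms.length : Int) 1).all (fun j =>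
        PySem.List.pyGet? ms j ==
          PySem.List.pyGet? cs (PySem.Int.mod ((i : Int) + j) (cs.length : Int))) = true)
    ↔ ∀ j < ms.length, ms.getD j 'A' = cs.getD ((i + j) % cs.length) 'A' := by
  rw [List.all_eq_true]
  have hmod : ∀ j : Nat, (i + j) % cs.length < cs.length :=
    fun j => Nat.mod_lt _ (Nat.pos_of_ne_zero hcs)
  constructor
  · intro h j hj
    have hx := h (j : Int) (PySem.List.mem_pyRange_one.mpr ⟨by positivity, by exact_mod_cast hj⟩)
    rw [← Nat.cast_add, PySem.Int.mod_natCast, PySem.List.pyGet?_natCast,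
      PySem.List.pyGet?_natCast, beq_iff_eq, List.getElem?_eq_getElem hj,
      List.getElem?_eq_getElem (hmod j)] at hx
    rw [List.getD_eq_getElem _ _ hj, List.getD_eq_getElem _ _ (hmod j)]
    exact Option.some_inj.mp hx
  · intro h x hx
    obtain ⟨hx0, hxk⟩ := PySem.List.mem_pyRange_one.mp hx
    have hxe : x = (x.toNat : Int) := by omega
    have hjk : x.toNat < ms.length := by omega
    rw [hxe, ← Nat.cast_add, PySem.Int.mod_natCast, PySem.List.pyGet?_natCast,
      PySem.List.pyGet?_natCast, beq_iff_eq, List.getElem?_eq_getElem hjk,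
      List.getElem?_eq_getElem (hmod x.toNat)]
    have := h x.toNat hjk
    rw [List.getD_eq_getElem _ _ hjk, List.getD_eq_getElem _ _ (hmod x.toNat)] at this
    exact congrArg some this

theorem pvMatches_iff (ms cs : List Char) (n : Nat) (hcs : cs.length ≠ 0) :
    (pvMatches ms cs (n : Int) = true)
    ↔ (ms.length ≤ n ∧ ∃ i, i < min cs.length (n - ms.length + 1) ∧
        ∀ j < ms.length, ms.getD j 'A' = cs.getD ((i + j) % cs.length) 'A') := by
  simp only [pvMatches]
  by_cases hkn : ms.length ≤ n
  · rw [if_neg (by omega)]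
    have hmin : min (cs.length : Int) ((n : Int) - ms.length + 1) =
        ((min cs.length (n - ms.length + 1) : Nat) : Int) := by omega
    rw [hmin, List.any_eq_true]
    constructor
    · rintro ⟨x, hx, hpred⟩
      obtain ⟨hx0, hxlt⟩ := PySem.List.mem_pyRange_one.mp hx
      have hxe : x = (x.toNat : Int) := by omega
      rw [hxe] at hpred
      exact ⟨hkn, x.toNat, by omega, (inner_all_iff ms cs hcs x.toNat).mp hpred⟩
    · rintro ⟨-, i, hilt, hj⟩
      exact ⟨(i : Int), PySem.List.mem_pyRange_one.mpr ⟨by positivity, by exact_mod_cast hilt⟩,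
        (inner_all_iff ms cs hcs i).mpr hj⟩
  · rw [if_pos (by omega)]
    simp [hkn]

theorem isIn_played_iff (ms cs : List Char) (n : Nat) (hcs : cs.length ≠ 0) :
    (PySem.Chars.isIn ms
        ((List.replicate (n / cs.length) cs).flatten ++ cs.take (n % cs.length)) = true)
    ↔ (ms.length ≤ n ∧ ∃ i, i < min cs.length (n - ms.length + 1) ∧
        ∀ j < ms.length, ms.getD j 'A' = cs.getD ((i + j) % cs.length) 'A') := by
  have hLpos : 0 < cs.length := Nat.pos_of_ne_zero hcs
  have hrle : n % cs.length ≤ cs.length := le_of_lt (Nat.mod_lt _ hLpos)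
  have hqn : n / cs.length * cs.length + n % cs.length = n := by
    rw [Nat.mul_comm]; exact Nat.div_add_mod n cs.length
  rw [PySem.Chars.isIn_iff_infix, infix_iff_getD ms _ 'A', played_length cs _ _ hrle, hqn]
  constructor
  · rintro ⟨i, hile, hj⟩
    refine ⟨by omega, i % cs.length, ?_, ?_⟩
    · have h1 : i % cs.length < cs.length := Nat.mod_lt _ hLpos
      have h2 : i % cs.length ≤ i := Nat.mod_le _ _
      omega
    · intro j hjk
      have h1 := hj j hjk
      rw [played_getD cs _ _ _ 'A' hrle (by omega)] at h1
      rw [Nat.mod_add_mod]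
      exact h1
  · rintro ⟨hkn, i, hilt, hj⟩
    refine ⟨i, by omega, ?_⟩
    intro j hjk
    rw [played_getD cs _ _ _ 'A' hrle (by omega)]
    exact hj j hjk

theorem isIn_played_eq_pvMatches (ms cs : List Char) (T : Int) (hcs : cs.length ≠ 0)
    (hT : 0 < T) :
    PySem.Chars.isIn ms (PySem.List.pyRepeat cs (PySem.Int.floordiv T (cs.length : Int)) ++
      PySem.List.slice cs (some 0) (some (PySem.Int.mod T (cs.length : Int)))) =
    pvMatches ms cs T := by
  have hLpos : 0 < cs.length := Nat.pos_of_ne_zero hcs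
  have hTn : T = (T.toNat : Int) := by omega
  rw [hTn, PySem.Int.floordiv_natCast, PySem.Int.mod_natCast]
  have hrepeat : PySem.List.pyRepeat cs ((T.toNat / cs.length : Nat) : Int) =
      (List.replicate (T.toNat / cs.length) cs).flatten := by
    simp only [PySem.List.pyRepeat, Int.toNat_natCast]
  have hslice : ∀ r : Nat, r < cs.length → PySem.List.slice cs (some 0) (some (r : Int)) =
      cs.take r := by
    intro r hrlt
    simp [PySem.List.slice, PySem.List.clampIdx]
    split_ifs <;> omega
  rw [hrepeat, hslice _ (Nat.mod_lt _ hLpos)]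
  have h1 := isIn_played_iff ms cs T.toNat hcs
  have h2 := pvMatches_iff ms cs T.toNat hcs
  rw [← h2] at h1
  exact Bool.eq_iff_iff.mpr h1

lemma snd_if (cond : Bool) (x : String) (T : Int) (s : String × Int)
    (hs : 0 ≤ s.2) (hT : cond = true → 0 ≤ T) : 0 ≤ (if cond then (x, T) else s).2 := by
  cases cond <;> simp_all

set_option maxHeartbeats 1000000 in
theorem step_both (melody : String) (s : String × Int) (info : String)
    (hok : pvInfoOK info = true) (hs : 0 ≤ s.2) :
    solStep melody s info = altStep melody.toList s info ∧ 0 ≤ (solStep melody s info).2 := by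
  cases h1 : PySem.Str.split? info "," with
  | none => simp only [pvInfoOK, h1] at hok; exact absurd hok Bool.false_ne_true
  | some l =>
    rcases l with _ | ⟨start, _ | ⟨e, _ | ⟨nm, _ | ⟨note, _ | ⟨x, l⟩⟩⟩⟩⟩
    · simp only [pvInfoOK, h1] at hok; exact absurd hok Bool.false_ne_true
    · simp only [pvInfoOK, h1] at hok; exact absurd hok Bool.false_ne_true
    · simp only [pvInfoOK, h1] at hok; exact absurd hok Bool.false_ne_true
    · simp only [pvInfoOK, h1] at hok; exact absurd hok Bool.false_ne_true
    case _ =>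
      cases h2 : PySem.Str.split? start ":" with
      | none => simp only [pvInfoOK, h1, h2] at hok; exact absurd hok Bool.false_ne_true
      | some l2 =>
        rcases l2 with _ | ⟨shr, _ | ⟨smin, _ | ⟨y, l2⟩⟩⟩
        · simp only [pvInfoOK, h1, h2] at hok; exact absurd hok Bool.false_ne_true
        · simp only [pvInfoOK, h1, h2] at hok; exact absurd hok Bool.false_ne_true
        case _ =>
          cases h3 : PySem.Str.split? e ":" with
          | none => simp only [pvInfoOK, h1, h2, h3] at hok; exact absurd hok Bool.false_ne_true
          | some l3 =>
            rcases l3 with _ | ⟨ehr, _ | ⟨emin, _ | ⟨z, l3⟩⟩⟩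
            · simp only [pvInfoOK, h1, h2, h3] at hok; exact absurd hok Bool.false_ne_true
            · simp only [pvInfoOK, h1, h2, h3] at hok; exact absurd hok Bool.false_ne_true
            case _ =>
              simp only [pvInfoOK, h1, h2, h3] at hok
              cases ha : PySem.Int.ofStr? shr with
              | none => rw [ha] at hok; simp at hok
              | some a =>
              cases hb : PySem.Int.ofStr? smin with
              | none => rw [ha, hb] at hok; simp at hok
              | some b =>
              cases hc : PySem.Int.ofStr? ehr with
              | none => rw [ha, hb, hc] at hok; simp at hok
              | some c =>
              cases hd : PySem.Int.ofStr? emin with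
              | none => rw [ha, hb, hc, hd] at hok; simp at hok
              | some d =>
                rw [ha, hb, hc, hd] at hok
                simp only [Option.isSome_some, Bool.true_and, Bool.and_true,
                  Bool.not_eq_true', List.isEmpty_eq_false_iff] at hok
                have hcs : ((pvTr note).toList).length ≠ 0 := by
                  simpa [List.length_eq_zero_iff] using hok
                simp only [solStep, altStep, pvMinutes, h1, h2, h3, ha, hb, hc, hd]
                rw [if_neg hcs]
                constructor
                · by_cases hlt : s.2 < c * 60 + d - (a * 60 + b)
                  · rw [isIn_played_eq_pvMatches _ _ _ hcs (by omega), Bool.and_comm]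
                  · rw [decide_eq_false hlt, Bool.and_false, Bool.false_and,
                      if_neg (by simp)]
                · apply snd_if _ _ _ _ hs
                  intro hct
                  rw [Bool.and_eq_true, decide_eq_true_iff] at hct
                  omega
            · simp only [pvInfoOK, h1, h2, h3] at hok; exact absurd hok Bool.false_ne_true
        · simp only [pvInfoOK, h1, h2] at hok; exact absurd hok Bool.false_ne_true
    · simp only [pvInfoOK, h1] at hok; exact absurd hok Bool.false_ne_true

theorem fold_eq (melody : String) (infos : List String) (s : String × Int)
    (hs : 0 ≤ s.2) (hall : infos.all pvInfoOK = true) :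
    infos.foldl (solStep melody) s = infos.foldl (altStep melody.toList) s := by
  induction infos generalizing s with
  | nil => rfl
  | cons i t ih =>
    simp only [List.all_cons, Bool.and_eq_true] at hall
    obtain ⟨heq, hsnd⟩ := step_both melody s i hall.1 hs
    simp only [List.foldl_cons]
    rw [← heq]
    exact ih _ hsnd hall.2

-- ===== VERDICT (by name: the statement is the Claim_ definition above) =====
theorem solution_spec : Claim_equal_solution := by
  intro m musicinfos _ hpre
  unfold Spec_solution solution solution_alt
  rw [fold_eq (pvTr m) musicinfos ("(None)", 0) (by norm_num) hpre]
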